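-- pv_equiv track=rewrite | github.com/Zhaoyi-Tian/2024-fall-assignmentP | 取石子游戏.py | find
-- ===== SOURCE A (Python) =====
-- def find(a,b):
--     a,b=max(a,b),min(a,b)
--     while True:
--         if a==b:
--             return 'win'
--         if a/b>=2 or a==b:
--             return 'win'
--         else:
--             a-=b
--             if a==b:
--                 return 'lose'
--             elif b/a>=2 :
--                 return 'lose'
--             else:
--                 b-=a
-- ===== SOURCE B (Python) =====
-- def find(a, b):
--     a, b = max(a, b), min(a, b)
--     # Closed form: the forced subtraction game is won by the first player
--     # iff the piles are equal or a/b is at least the golden ratio,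
--     # i.e. a*a >= a*b + b*b (a*a == a*b + b*b is impossible for integers 0 < b < a).
--     return 'win' if a == b or a * a >= a * b + b * b else 'lose'
-- ===== Notes on version B (the rewrite author's own statement) =====
-- stated objective: simpler
-- what changed: A's subtraction loop is replaced by the closed-form golden-ratio test: after swapping so a>=b, the first player wins iff a==b or a*a >= a*b + b*b, so B is a single comparison with no loop.
import Mathlib
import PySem

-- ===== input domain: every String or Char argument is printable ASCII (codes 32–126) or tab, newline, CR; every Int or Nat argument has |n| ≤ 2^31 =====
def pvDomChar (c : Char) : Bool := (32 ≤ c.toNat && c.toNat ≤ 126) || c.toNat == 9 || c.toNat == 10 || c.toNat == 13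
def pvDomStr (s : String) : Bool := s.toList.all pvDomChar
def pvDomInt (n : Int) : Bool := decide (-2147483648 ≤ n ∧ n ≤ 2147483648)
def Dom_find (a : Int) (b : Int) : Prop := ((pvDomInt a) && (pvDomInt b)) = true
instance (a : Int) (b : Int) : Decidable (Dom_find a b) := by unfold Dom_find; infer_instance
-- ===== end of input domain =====

-- B replaces A's subtraction loop by the closed-form golden-ratio test (objective: simpler, a single comparison instead of a loop).
-- Port note: A's float comparison a/b>=2 is modelled as the exact 2*b ≤ a: on Pre_ we have 0 < b ≤ a ≤ 2^31,
-- where the rounded double a/b is ≥ 2 exactly when a ≥ 2b (the true ratio is at least 1/b > ulp(2) away from 2).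

-- ===== PORT A =====
-- A's while-True loop, step for step; fuel makes it total (under Pre_ the fuel (a+b).toNat+1 suffices,
-- fuel exhaustion is unreachable there).
def findLoopA : Nat → Int → Int → String
  | 0, _, _ => "win"
  | n+1, a, b =>
    if a = b then "win"
    else if 2*b ≤ a then "win"            -- a/b >= 2 (exact on Pre_, see header); 'or a==b' is then redundant
    else
      let a' := a - b                      -- a -= b
      if a' = b then "lose"
      else if 2*a' ≤ b then "lose"         -- b/a >= 2
      else findLoopA n a' (b - a')         -- b -= a

def find (a : Int) (b : Int) : String :=
  findLoopA ((max a b + min a b).toNat + 1) (max a b) (min a b)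

-- ===== PORT B =====
-- B: swap so a ≥ b, then the single closed-form test.
def find_alt (a : Int) (b : Int) : String :=
  let x := max a b
  let y := min a b
  if x = y ∨ x*y + y*y ≤ x*x then "win" else "lose"

-- ===== PRECONDITION & SPEC =====
-- Pre_ excludes exactly the inputs on which A does not return: min(a,b) = 0 with a ≠ b raises
-- ZeroDivisionError, and min(a,b) < 0 with a ≠ b never terminates; a = b always returns 'win'.
def Pre_find (a : Int) (b : Int) : Prop := a = b ∨ (0 < a ∧ 0 < b)
instance (a : Int) (b : Int) : Decidable (Pre_find a b) := by unfold Pre_find; infer_instance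
def pvWitness_find : Int × Int := (13, 5)

def Spec_find (a : Int) (b : Int) (out : String) : Prop := out = find_alt a b
instance (a : Int) (b : Int) (out : String) : Decidable (Spec_find a b out) := by unfold Spec_find; infer_instance

-- ===== CLAIM (what is proved, stated in full; the proofs are below) =====
def Claim_equal_find : Prop := ∀ (a : Int) (b : Int), Dom_find a b → Pre_find a b → Spec_find a b (find a b)

-- ===== LEMMAS AND PROOFS =====

-- The game value: true iff the player to move at (a,b) (with a ≥ b) wins.
def game (a b : Nat) : Bool :=
  if a ≤ b ∨ 2*b ≤ a then true
  else !(game b (a - b))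
termination_by a + b
decreasing_by omega

theorem game_unfold (a b : Nat) :
    game a b = if a ≤ b ∨ 2*b ≤ a then true else !(game b (a - b)) := by
  rw [game]

-- A's loop computes the game value (two moves per iteration).
theorem loopA_eq_game (n : Nat) : ∀ (a b : Int), 0 < b → b ≤ a → (a + b).toNat ≤ n →
    findLoopA n a b = if game a.toNat b.toNat then "win" else "lose" := by
  induction n with
  | zero => intro a b hb hba hn; omega
  | succ n ih =>
    intro a b hb hba hn
    by_cases hab : a = b
    · subst hab
      have hg : game a.toNat a.toNat = true := by
        rw [game_unfold, if_pos (Or.inl le_rfl)]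
      simp [findLoopA, hg]
    · have hba' : b < a := lt_of_le_of_ne hba (fun h => hab h.symm)
      by_cases h2 : 2*b ≤ a
      · have hg : game a.toNat b.toNat = true := by
          rw [game_unfold, if_pos (Or.inr (by omega))]
        simp [findLoopA, hab, h2, hg]
      · have hne : ¬ (a - b = b) := by omega
        have hgd1 : ¬ (a.toNat ≤ b.toNat ∨ 2*b.toNat ≤ a.toNat) := by omega
        by_cases h3 : 2*(a - b) ≤ b
        · have hg : game a.toNat b.toNat = false := by
            rw [game_unfold, if_neg hgd1, game_unfold,
              if_pos (Or.inr (by omega : 2*(a.toNat - b.toNat) ≤ b.toNat))]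
            rfl
          simp [findLoopA, hab, h2, hne, h3, hg]
        · have e1 : (a - b).toNat = a.toNat - b.toNat := by omega
          have e2 : (b - (a - b)).toNat = b.toNat - (a.toNat - b.toNat) := by omega
          have hgd2 : ¬ (b.toNat ≤ a.toNat - b.toNat ∨ 2*(a.toNat - b.toNat) ≤ b.toNat) := by omega
          have hg : game a.toNat b.toNat = game (a - b).toNat (b - (a - b)).toNat := by
            rw [game_unfold, if_neg hgd1, game_unfold, if_neg hgd2, Bool.not_not, e1, e2]
          have hrec := ih (a - b) (b - (a - b)) (by omega) (by omega) (by omega)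
          simp only [findLoopA, if_neg hab, if_neg h2, if_neg hne, if_neg h3]
          rw [hrec, hg]

-- a*a = a*b + b*b has no solution with 0 < b (infinite descent / irrationality of the golden ratio).
theorem nofix : ∀ b a : Nat, 0 < b → a*a = a*b + b*b → False := by
  intro b
  induction b using Nat.strong_induction_on with
  | _ b ih =>
    intro a hb h
    have hba : b < a := by nlinarith
    have ha2 : a < 2*b := by nlinarith
    have hac : a = b + (a - b) := by omega
    have h2 : b*b = b*(a-b) + (a-b)*(a-b) := by
      have hc : ∀ c, a = b + c → b*b = b*c + c*c := by
        intro c hce; subst hce; nlinarith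
      exact hc (a - b) hac
    exact ih (a - b) (by omega) b (by omega) h2

-- Closed form for the game value.
theorem game_eq_closed : ∀ n a b : Nat, a + b ≤ n → 0 < b → b ≤ a →
    (game a b = true ↔ (a = b ∨ a*b + b*b ≤ a*a)) := by
  intro n
  induction n with
  | zero => intro a b hn hb hba; omega
  | succ n ih =>
    intro a b hn hb hba
    rw [game_unfold]
    by_cases hstop : a ≤ b ∨ 2*b ≤ a
    · rw [if_pos hstop]
      constructor
      · intro _
        rcases hstop with h1 | h2
        · left; omega
        · right; nlinarith
      · intro _; rfl
    · rw [if_neg hstop]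
      push Not at hstop
      obtain ⟨h1, h2⟩ := hstop
      have hsub := ih b (a - b) (by omega) (by omega) (by omega)
      have hcb : a - b < b := by omega
      have hc0 : 0 < a - b := by omega
      have hne : b*b ≠ b*(a-b) + (a-b)*(a-b) := fun h => nofix (a-b) b hc0 h
      have hiff : (a*b + b*b ≤ a*a) ↔ (b*b ≤ b*(a-b) + (a-b)*(a-b)) := by
        have hg : ∀ c, a = b + c → ((a*b + b*b ≤ a*a) ↔ (b*b ≤ b*c + c*c)) := by
          intro c hce; subst hce; constructor <;> intro <;> nlinarith
        exact hg (a - b) (by omega)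
      have habne : a ≠ b := by omega
      rw [Bool.not_eq_true', Bool.eq_false_iff, ne_eq, hsub]
      constructor
      · intro hno
        push Not at hno
        exact Or.inr (hiff.mpr (Nat.le_of_lt hno.2))
      · rintro (h | h) hcon
        · exact habne h
        · rcases hcon with h1' | h2'
          · omega
          · exact hne (Nat.le_antisymm (hiff.mp h) h2')

-- ===== VERDICT (by name: the statement is the Claim_ definition above) =====
theorem find_spec : Claim_equal_find := by
  intro a b _ hpre
  unfold Spec_find find find_alt
  rcases hpre with hab | ⟨ha, hb⟩
  · subst hab
    simp [max_self, min_self, findLoopA]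
  · have h1 : (0:Int) < min a b := by omega
    have h2 : min a b ≤ max a b := by omega
    have h3 : (max a b + min a b).toNat ≤ (max a b + min a b).toNat + 1 := by omega
    rw [loopA_eq_game _ _ _ h1 h2 h3]
    set x := max a b with hx
    set y := min a b with hy
    have hiff := game_eq_closed (x.toNat + y.toNat) x.toNat y.toNat le_rfl (by omega) (by omega)
    have hxN : ((x.toNat : Int)) = x := Int.toNat_of_nonneg (by omega)
    have hyN : ((y.toNat : Int)) = y := Int.toNat_of_nonneg (by omega)
    by_cases hg : game x.toNat y.toNat = true
    · have hr := hiff.mp hg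
      have hright : x = y ∨ x*y + y*y ≤ x*x := by
        rcases hr with h | h
        · left; omega
        · right
          have : ((x.toNat : Int))*(y.toNat) + (y.toNat)*(y.toNat) ≤ (x.toNat)*(x.toNat) := by
            exact_mod_cast h
          rwa [hxN, hyN] at this
      rw [hg, if_pos hright]
      simp
    · have hnr : ¬ (x = y ∨ x*y + y*y ≤ x*x) := by
        intro hr
        apply hg
        apply hiff.mpr
        rcases hr with h | h
        · left; omega
        · right
          have h' : ((x.toNat : Int))*(y.toNat) + (y.toNat)*(y.toNat) ≤ (x.toNat)*(x.toNat) := by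
            rw [hxN, hyN]; exact h
          exact_mod_cast h'
      rw [Bool.not_eq_true] at hg
      rw [hg, if_neg hnr]
      simp
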